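-- pv_equiv track=rewrite | github.com/ilikecubesnstuff/commensurability | examples/outdated_scripts/cleanup/simple.py | clump
-- ===== SOURCE A (Python) =====
-- def clump(it, chunksize=10):
--     chunk = []
--     for i, obj in enumerate(it):
--         chunk.append(obj)
--         if len(chunk) == chunksize:
--             yield tuple(chunk)
--             chunk = []
--     if chunk:
--         yield tuple(chunk)
-- ===== SOURCE B (Python) =====
-- def clump(it, chunksize=10):
--     seq = list(it)
--     for i in range(0, len(seq), chunksize):
--         yield tuple(seq[i:i + chunksize])
-- ===== Notes on version B (the rewrite author's own statement) =====
-- stated objective: idiomatic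
-- what changed: B materialises the input once and yields fixed-size slices by stepping an index range (bulk C-level list slicing), instead of A's per-element accumulator list with a length check after every append.
-- intended difference: For negative chunksize on non-empty input A returns the whole input as one oversized chunk (its length-equality test can never fire), while B yields no chunks; producing no chunks is the intended reading of a non-positive chunk size. — e.g. on clump([1, 2], -1): A returns [[1, 2]], B returns []
-- outside the precondition, e.g. on clump([1, 2], 0): A returns [(1, 2)], B raises ValueError
import Mathlib
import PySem

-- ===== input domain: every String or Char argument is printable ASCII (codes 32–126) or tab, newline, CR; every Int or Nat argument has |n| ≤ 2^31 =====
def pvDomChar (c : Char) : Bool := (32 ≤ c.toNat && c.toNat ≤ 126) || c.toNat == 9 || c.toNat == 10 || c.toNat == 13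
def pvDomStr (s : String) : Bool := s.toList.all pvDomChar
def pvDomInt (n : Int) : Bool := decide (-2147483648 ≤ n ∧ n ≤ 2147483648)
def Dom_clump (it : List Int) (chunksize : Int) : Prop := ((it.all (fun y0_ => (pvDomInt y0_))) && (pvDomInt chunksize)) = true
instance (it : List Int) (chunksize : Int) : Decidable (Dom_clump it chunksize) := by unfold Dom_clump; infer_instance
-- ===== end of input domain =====

-- B yields fixed-size slices over a stepped index range instead of A's per-element accumulator list; return-value equivalence only (both Pythons are generators; outputs compared as the list of yielded chunks).


-- ===== PORT A =====
-- stepA is the body of A's for-loop (append, then emit-and-reset when the chunk is full)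
def stepA (chunksize : Int) (p : List (List Int) × List Int) (iobj : Int × Int) :
    List (List Int) × List Int :=
  let chunk := p.2 ++ [iobj.2]
  if (chunk.length : Int) = chunksize then (p.1 ++ [chunk], ([] : List Int))
  else (p.1, chunk)

def clump (it : List Int) (chunksize : Int) : List (List Int) :=
  let st := (PySem.List.enumerate it).foldl (stepA chunksize)
    (([] : List (List Int)), ([] : List Int))
  if st.2 ≠ [] then st.1 ++ [st.2] else st.1

-- ===== PORT B =====
def clump_alt (it : List Int) (chunksize : Int) : List (List Int) :=
  (PySem.List.pyRange 0 (it.length : Int) chunksize).map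
    (fun i => PySem.List.slice it (some i) (some (i + chunksize)))


-- ===== PRECONDITION & SPEC =====
-- Pre_ excludes exactly chunksize = 0, where Python A returns the whole input as one chunk but B raises ValueError (range() with step 0).
def Pre_clump (it : List Int) (chunksize : Int) : Prop := chunksize ≠ 0
instance (it : List Int) (chunksize : Int) : Decidable (Pre_clump it chunksize) := by unfold Pre_clump; infer_instance
def pvWitness_clump : List Int × Int := ([1, 2, 3], 2)

-- For negative chunksize on non-empty input A returns the whole input as one oversized chunk (its length-equality test can never fire), while B yields no chunks; producing no chunks is the intended reading of a non-positive chunk size.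
def D_clump (it : List Int) (chunksize : Int) : Prop := chunksize < 0 ∧ it ≠ []
instance (it : List Int) (chunksize : Int) : Decidable (D_clump it chunksize) := by unfold D_clump; infer_instance
def Spec_clump (it : List Int) (chunksize : Int) (out : List (List Int)) : Prop := ¬ D_clump it chunksize → out = clump_alt it chunksize
instance (it : List Int) (chunksize : Int) (out : List (List Int)) : Decidable (Spec_clump it chunksize out) := by unfold Spec_clump; infer_instance
def pvDiffWitness_clump : List Int × Int := ([1, 2], -1)
def pvDiffWitnessOut_clump : (List (List Int)) × (List (List Int)) := ([[1, 2]], [])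

-- ===== CLAIM (what is proved, stated in full; the proofs are below) =====
def Claim_unchanged_clump : Prop := ∀ (it : List Int) (chunksize : Int), Dom_clump it chunksize → Pre_clump it chunksize → Spec_clump it chunksize (clump it chunksize)
def Claim_changed_clump : Prop := Dom_clump (pvDiffWitness_clump.1) (pvDiffWitness_clump.2) ∧ Pre_clump (pvDiffWitness_clump.1) (pvDiffWitness_clump.2) ∧ D_clump (pvDiffWitness_clump.1) (pvDiffWitness_clump.2) ∧ clump (pvDiffWitness_clump.1) (pvDiffWitness_clump.2) = pvDiffWitnessOut_clump.1 ∧ clump_alt (pvDiffWitness_clump.1) (pvDiffWitness_clump.2) = pvDiffWitnessOut_clump.2 ∧ pvDiffWitnessOut_clump.1 ≠ pvDiffWitnessOut_clump.2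
def Claim_exact_clump : Prop := ∀ (it : List Int) (chunksize : Int), Dom_clump it chunksize → Pre_clump it chunksize → D_clump it chunksize → clump it chunksize ≠ clump_alt it chunksize

-- ===== LEMMAS AND PROOFS =====
theorem pyRange_pos_nil (a b s : Int) (hs : 0 < s) (hba : b ≤ a) :
    PySem.List.pyRange a b s = [] := by
  rw [PySem.List.pyRange_of_pos _ _ hs, if_neg (by omega)]
  simp

theorem pyRange_neg_nil (L c : Int) (hL : 0 ≤ L) (hc : c < 0) :
    PySem.List.pyRange 0 L c = [] := by
  simp only [PySem.List.pyRange]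
  rw [if_neg (by omega : ¬ c = 0)]
  simp only [if_neg (by omega : ¬ 0 < c), if_neg (by omega : ¬ L < 0)]
  simp

theorem pyRange_pos_cons (a b s : Int) (hs : 0 < s) (hab : a < b) :
    PySem.List.pyRange a b s = a :: PySem.List.pyRange (a + s) b s := by
  rw [PySem.List.pyRange_of_pos _ _ hs, PySem.List.pyRange_of_pos _ _ hs, if_pos hab]
  have key : (b - a + s - 1) / s = (b - (a + s) + s - 1) / s + 1 := by
    have h : b - a + s - 1 = (b - (a + s) + s - 1) + 1 * s := by ring
    rw [h, Int.add_mul_ediv_right _ _ (by omega)]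
  by_cases h2 : a + s < b
  · rw [if_pos h2]
    have hq : 0 ≤ (b - (a + s) + s - 1) / s := Int.ediv_nonneg (by omega) hs.le
    have hcnt : ((b - a + s - 1) / s).toNat = ((b - (a + s) + s - 1) / s).toNat + 1 := by omega
    rw [hcnt, List.range_succ_eq_map]
    simp only [List.map_cons, List.map_map]
    rw [show a + s * ((0:Nat):Int) = a by simp]
    congr 1
    apply List.map_congr_left
    intro k _
    simp [Function.comp, Nat.succ_eq_add_one]
    ring
  · rw [if_neg h2]
    have h0 : (b - (a + s) + s - 1) / s = 0 := Int.ediv_eq_zero_of_lt (by omega) (by omega)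
    have hcnt : ((b - a + s - 1) / s).toNat = 1 := by omega
    rw [hcnt]
    simp

theorem pyRange_pos_shift (a b s : Int) (hs : 0 < s) :
    PySem.List.pyRange a b s = (PySem.List.pyRange 0 (b - a) s).map (a + ·) := by
  rw [PySem.List.pyRange_of_pos _ _ hs, PySem.List.pyRange_of_pos _ _ hs]
  rw [show b - a - 0 = b - a by ring]
  by_cases hab : a < b
  · rw [if_pos hab, if_pos (by omega : (0:Int) < b - a), List.map_map]
    apply List.map_congr_left
    intro k _
    simp
  · rw [if_neg hab, if_neg (by omega : ¬ (0:Int) < b - a)]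
    simp

def chunksN (xs : List Int) (n : Nat) : List (List Int) :=
  if h : xs = [] ∨ n = 0 then [] else xs.take n :: chunksN (xs.drop n) n
termination_by xs.length
decreasing_by
  push_neg at h
  have : 0 < xs.length := List.length_pos_iff.mpr h.1
  simp [List.length_drop]; omega

theorem chunksN_cons_full (pref xs : List Int) (n : Nat) (hp : pref.length = n)
    (hn : 0 < n) : chunksN (pref ++ xs) n = pref :: chunksN xs n := by
  have hne : pref ++ xs ≠ [] := by
    intro hh
    have := congrArg List.length hh
    simp only [List.length_append, List.length_nil] at this
    omega
  rw [chunksN, dif_neg (by push_neg; exact ⟨hne, by omega⟩)]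
  rw [List.take_left' hp, List.drop_left' hp]

theorem loopA_inv (n : Nat) (hn : 0 < n) (l : List Int) :
    ∀ (s : Int) (done : List (List Int)) (chunk : List Int), chunk.length < n →
    (let st := (PySem.List.enumerate l s).foldl (stepA ((n : Nat) : Int)) (done, chunk);
     if st.2 ≠ [] then st.1 ++ [st.2] else st.1) = done ++ chunksN (chunk ++ l) n := by
  induction l with
  | nil =>
    intro s done chunk h
    simp only [PySem.List.enumerate_nil, List.foldl_nil, List.append_nil]
    by_cases hch : chunk = []
    · subst hch
      rw [chunksN]
      simp
    · rw [chunksN, dif_neg (by simp [hch]; omega)]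
      rw [List.take_of_length_le h.le, List.drop_eq_nil_of_le h.le, chunksN]
      simp [hch]
  | cons x xs ih =>
    intro s done chunk h
    simp only [PySem.List.enumerate_cons, List.foldl_cons]
    by_cases hlen : chunk.length + 1 = n
    · have hc : (((chunk ++ [x]).length : Nat) : Int) = ((n : Nat) : Int) := by
        simp [← hlen]
      rw [show stepA ((n : Nat) : Int) (done, chunk) (s, x)
            = (done ++ [chunk ++ [x]], ([] : List Int)) by
          simp only [stepA]; rw [if_pos hc]]
      rw [ih (s + 1) (done ++ [chunk ++ [x]]) [] (by simpa using hn)]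
      rw [show chunk ++ x :: xs = (chunk ++ [x]) ++ xs by simp]
      rw [chunksN_cons_full (chunk ++ [x]) xs n
            (by simp only [List.length_append, List.length_cons, List.length_nil]; omega) hn]
      simp
    · have hc : ¬ ((((chunk ++ [x]).length : Nat) : Int) = ((n : Nat) : Int)) := by
        simp only [List.length_append, List.length_cons, List.length_nil, Int.natCast_inj]
        omega
      rw [show stepA ((n : Nat) : Int) (done, chunk) (s, x)
            = (done, chunk ++ [x]) by
          simp only [stepA]; rw [if_neg hc]]
      rw [ih (s + 1) done (chunk ++ [x]) (by simp; omega)]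
      simp

theorem clump_eq_chunksN (it : List Int) (c : Int) (hc : 0 < c) :
    clump it c = chunksN it c.toNat := by
  obtain ⟨n, rfl⟩ : ∃ n : Nat, c = (n : Int) := ⟨c.toNat, (Int.toNat_of_nonneg hc.le).symm⟩
  have hn : 0 < n := by exact_mod_cast hc
  have h := loopA_inv n hn it 0 [] [] (by simpa using hn)
  simpa [clump] using h

theorem clump_alt_nil (c : Int) (hc : 0 < c) : clump_alt [] c = [] := by
  simp [clump_alt, pyRange_pos_nil 0 0 c hc (le_refl 0)]

theorem clump_alt_eq_chunksN (it : List Int) (c : Int) (hc : 0 < c) :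
    clump_alt it c = chunksN it c.toNat := by
  obtain ⟨n, rfl⟩ : ∃ n : Nat, c = (n : Int) := ⟨c.toNat, (Int.toNat_of_nonneg hc.le).symm⟩
  have hn : 0 < n := by exact_mod_cast hc
  rw [Int.toNat_natCast]
  suffices H : ∀ (m : Nat) (l : List Int), l.length ≤ m → clump_alt l (n : Int) = chunksN l n from
    H it.length it le_rfl
  intro m
  induction m with
  | zero =>
    intro l hl
    have hnil : l = [] := List.eq_nil_of_length_eq_zero (Nat.le_zero.mp hl)
    subst hnil
    rw [clump_alt_nil _ hc, chunksN]
    simp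
  | succ m ih =>
    intro l hl
    match l with
    | [] => rw [clump_alt_nil _ hc, chunksN]; simp
    | x :: xs =>
      have hL0 : (0:Int) < ((x::xs).length : Int) := by
        simp only [List.length_cons]
        exact_mod_cast Nat.succ_pos _
      have hhead : PySem.List.slice (x::xs) (some 0) (some (0 + (n:Int))) = (x::xs).take n := by
        rw [zero_add, PySem.List.slice_toNat _ (le_refl 0) hc.le]
        simp
      have htail : ((PySem.List.pyRange 0 (((x::xs).length:Int) - n) (n:Int)).map
          ((fun i => PySem.List.slice (x::xs) (some i) (some (i + n))) ∘ (fun i => (n:Int) + i)))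
          = clump_alt ((x::xs).drop n) (n:Int) := by
        unfold clump_alt
        by_cases hc2 : n ≤ (x::xs).length
        · have hblen : ((((x::xs).drop n).length : Nat) : Int) = ((x::xs).length : Int) - n := by
            simp only [List.length_drop]
            omega
          rw [hblen]
          apply List.map_congr_left
          intro i hi
          have hi0 : 0 ≤ i := ((PySem.List.mem_pyRange_iff_of_pos hc i).mp hi).1
          simp only [Function.comp_apply]
          rw [PySem.List.slice_toNat _ (by omega) (by omega),
              PySem.List.slice_toNat _ hi0 (by omega)]
          have e1 : ((n:Int) + i).toNat = n + i.toNat := by omega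
          have e2 : ((n:Int) + i + n).toNat = n + i.toNat + n := by omega
          have e3 : (i + (n:Int)).toNat = i.toNat + n := by omega
          rw [e1, e2, e3, List.drop_drop]
          rw [show n + i.toNat + n - (n + i.toNat) = n by omega,
              show i.toNat + n - i.toNat = n by omega]
        · have hdrop : (x::xs).drop n = [] := List.drop_eq_nil_of_le (by omega)
          rw [hdrop]
          rw [pyRange_pos_nil _ _ _ hc (by omega)]
          simp only [List.length_nil, Nat.cast_zero, List.map_nil]
          rw [pyRange_pos_nil _ _ _ hc (le_refl 0)]
          simp
      have hrec : chunksN (x::xs) n = (x::xs).take n :: chunksN ((x::xs).drop n) n := by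
        rw [chunksN, dif_neg (by push_neg; exact ⟨by simp, by omega⟩)]
      unfold clump_alt
      rw [pyRange_pos_cons 0 _ _ hc hL0, zero_add, List.map_cons,
          pyRange_pos_shift _ _ _ hc, List.map_map, hhead, htail,
          ih ((x::xs).drop n) (by simp only [List.length_drop, List.length_cons] at hl ⊢; omega),
          hrec]

theorem loopA_noemit (c : Int) (hc : c < 0) (l : List Int) :
    ∀ (s : Int) (done : List (List Int)) (chunk : List Int),
      (PySem.List.enumerate l s).foldl (stepA c) (done, chunk) = (done, chunk ++ l) := by
  induction l with
  | nil => intro s done chunk; simp [PySem.List.enumerate_nil]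
  | cons x xs ih =>
    intro s done chunk
    simp only [PySem.List.enumerate_cons, List.foldl_cons]
    rw [show stepA c (done, chunk) (s, x) = (done, chunk ++ [x]) by
      simp only [stepA]
      rw [if_neg (by have := Int.natCast_nonneg (chunk ++ [x]).length; omega)]]
    rw [ih (s + 1) done (chunk ++ [x])]
    simp

theorem clump_neg (it : List Int) (c : Int) (hc : c < 0) (hne : it ≠ []) :
    clump it c = [it] := by
  simp only [clump, loopA_noemit c hc it 0 [] [], List.nil_append]
  simp [hne]

theorem clump_alt_neg (it : List Int) (c : Int) (hc : c < 0) :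
    clump_alt it c = [] := by
  simp only [clump_alt]
  rw [pyRange_neg_nil _ _ (Int.natCast_nonneg _) hc]
  simp

-- ===== VERDICT (by name: the statement is the Claim_ definition above) =====
theorem clump_spec : Claim_unchanged_clump := by
  intro it c _ hpre hnd
  unfold Pre_clump at hpre
  unfold D_clump at hnd
  push_neg at hnd
  rcases lt_trichotomy c 0 with h | h | h
  · have hit : it = [] := hnd h
    subst hit
    rw [clump_alt_neg [] c h]
    simp [clump, PySem.List.enumerate_nil]
  · exact absurd h hpre
  · rw [clump_eq_chunksN it c h, clump_alt_eq_chunksN it c h]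

theorem clump_changed : Claim_changed_clump := by unfold Claim_changed_clump; decide

theorem clump_tight : Claim_exact_clump := by
  intro it c _ _ hd
  rw [clump_neg it c hd.1 hd.2, clump_alt_neg it c hd.1]
  simp
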